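-- pv_equiv track=rewrite | github.com/Maalfer/tech4u | backend/utils/xp.py | compute_level_from_total_xp
-- ===== SOURCE A (Python) =====
-- def xp_per_level(level: int) -> int:
--     """
--     XP required to advance from `level` to `level+1`.
--     Mirrors User.get_next_level_xp() exactly.
--       Levels  1-5 :   800 XP
--       Levels  6-10:  1500 XP
--       Levels 11-15:  2500 XP
--       Levels 16-19:  4000 XP
--       Level  20   :  cap (99999)
--     """
--     if level <= 5:  return 800
--     if level <= 10: return 1500
--     if level <= 15: return 2500
--     if level <= 19: return 4000
--     return 99999
--
-- def compute_level_from_total_xp(total_xp: int) -> tuple[int, int]: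
--     """
--     Given total accumulated XP, return (level, xp_in_current_level).
--     Used by admin panel to set XP → auto-compute level.
--     """
--     remaining = max(0, total_xp)
--     level = 1
--     while level < 20:
--         needed = xp_per_level(level)
--         if remaining >= needed:
--             remaining -= needed
--             level += 1
--         else:
--             break
--     return min(level, 20), remaining if level < 20 else 0
-- ===== SOURCE B (Python) =====
-- TIERS = [(5, 800), (5, 1500), (5, 2500), (4, 4000)]
--
-- def compute_level_from_total_xp(total_xp: int) -> tuple[int, int]:
--     remaining = max(0, total_xp)
--     level = 1
--     for count, cost in TIERS:
--         k = min(count, remaining // cost)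
--         level += k
--         remaining -= k * cost
--         if k < count:
--             break
--     return min(level, 20), 0 if level >= 20 else remaining
-- ===== Notes on version B (the rewrite author's own statement) =====
-- stated objective: alternative
-- what changed: Replaced the one-level-at-a-time while loop (up to nineteen subtraction iterations) with a small tier table processed by integer division, computing how many whole levels each tier contributes in one arithmetic step per tier.
import Mathlib
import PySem

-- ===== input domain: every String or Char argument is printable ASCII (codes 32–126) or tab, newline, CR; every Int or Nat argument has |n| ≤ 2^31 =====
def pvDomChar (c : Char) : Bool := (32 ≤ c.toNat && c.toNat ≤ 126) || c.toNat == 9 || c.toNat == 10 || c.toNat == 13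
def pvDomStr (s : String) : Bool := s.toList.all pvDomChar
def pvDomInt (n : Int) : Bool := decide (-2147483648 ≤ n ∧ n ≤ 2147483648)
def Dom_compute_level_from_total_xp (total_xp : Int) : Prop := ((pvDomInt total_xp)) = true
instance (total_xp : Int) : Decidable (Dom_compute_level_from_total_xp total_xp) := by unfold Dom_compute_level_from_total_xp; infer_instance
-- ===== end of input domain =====

-- B replaces A's one-level-at-a-time while loop by a small tier table processed with
-- integer division: one arithmetic step per tier instead of one loop iteration per level.

-- ===== PORT A =====
-- helper xp_per_level, transliterated
def xp_per_level (level : Int) : Int :=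
  if level ≤ 5 then 800
  else if level ≤ 10 then 1500
  else if level ≤ 15 then 2500
  else if level ≤ 19 then 4000
  else 99999

-- A's while loop; fuel 19 suffices since level starts at 1 and the loop runs only while level < 20
def loopA : Nat → Int → Int → Int × Int
  | 0, level, remaining => (level, remaining)
  | fuel + 1, level, remaining =>
    if level < 20 then
      let needed := xp_per_level level
      if remaining ≥ needed then loopA fuel (level + 1) (remaining - needed)
      else (level, remaining)
    else (level, remaining)

def compute_level_from_total_xp (total_xp : Int) : Int × Int :=
  let p := loopA 19 1 (max 0 total_xp)
  (min p.1 20, if p.1 < 20 then p.2 else 0)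

-- ===== PORT B =====
def pvTiers : List (Int × Int) := [(5, 800), (5, 1500), (5, 2500), (4, 4000)]

-- B's for loop over the tier table, with early break when a tier is not filled
def loopB : List (Int × Int) → Int → Int → Int × Int
  | [], level, remaining => (level, remaining)
  | (count, cost) :: rest, level, remaining =>
    let k := min count (PySem.Int.floordiv remaining cost)
    let level' := level + k
    let remaining' := remaining - k * cost
    if k < count then (level', remaining') else loopB rest level' remaining'

def compute_level_from_total_xp_alt (total_xp : Int) : Int × Int :=
  let p := loopB pvTiers 1 (max 0 total_xp)
  (min p.1 20, if p.1 ≥ 20 then 0 else p.2)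

-- ===== PRECONDITION & SPEC =====
def Spec_compute_level_from_total_xp (total_xp : Int) (out : Int × Int) : Prop := out = compute_level_from_total_xp_alt total_xp
instance (total_xp : Int) (out : Int × Int) : Decidable (Spec_compute_level_from_total_xp total_xp out) := by unfold Spec_compute_level_from_total_xp; infer_instance

-- ===== CLAIM (what is proved, stated in full; the proofs are below) =====
def Claim_equal_compute_level_from_total_xp : Prop := ∀ (total_xp : Int), Dom_compute_level_from_total_xp total_xp → Spec_compute_level_from_total_xp total_xp (compute_level_from_total_xp total_xp)

-- ===== LEMMAS AND PROOFS =====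

-- A's loop consumes a whole tier of n levels of equal cost in one characterization
theorem tierA (cost : Int) (hc : 0 < cost) :
    ∀ (n fuel : Nat) (level r : Int), n ≤ fuel → 0 ≤ r → level + n ≤ 20 →
    (∀ j : Int, 0 ≤ j → j < n → xp_per_level (level + j) = cost) →
    loopA fuel level r =
      if r < n * cost then (level + r / cost, r - r / cost * cost)
      else loopA (fuel - n) (level + n) (r - n * cost) := by
  intro n
  induction n with
  | zero =>
    intro fuel level r _ hr _ _
    rw [if_neg (by push_cast; omega)]
    norm_num
  | succ n ih =>
    intro fuel level r hfuel hr hlv hcost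
    obtain ⟨f, rfl⟩ : ∃ f, fuel = f + 1 := ⟨fuel - 1, by omega⟩
    have hneed : xp_per_level level = cost := by
      have := hcost 0 le_rfl (by positivity)
      simpa using this
    rw [loopA]
    rw [if_pos (by push_cast at hlv; omega)]
    simp only [hneed]
    by_cases hge : r ≥ cost
    · rw [if_pos hge]
      rw [ih f (level + 1) (r - cost) (by omega) (by omega) (by push_cast at hlv ⊢; omega)
        (by intro j hj0 hjn; have := hcost (j + 1) (by omega) (by push_cast at hjn ⊢; omega)
            rw [show level + 1 + j = level + (j + 1) by ring]; exact this)]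
      have hdiv : (r - cost) / cost = r / cost - 1 := by
        rw [show r - cost = r + (-1) * cost by ring,
            Int.add_mul_ediv_right _ _ (by omega : cost ≠ 0)]
        ring
      by_cases hb : r < ((n : Int) + 1) * cost
      · rw [if_pos (by nlinarith), if_pos (by push_cast; nlinarith)]
        rw [hdiv]
        refine Prod.ext ?_ ?_ <;> simp only <;> ring
      · rw [if_neg (by nlinarith), if_neg (by push_cast; nlinarith),
            show f + 1 - (n + 1) = f - n from by omega]
        congr 1 <;> push_cast <;> ring
    · rw [if_neg hge]
      have hdz : r / cost = 0 := Int.ediv_eq_zero_of_lt hr (by omega)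
      have hn0 : (0 : Int) ≤ (n : Int) := Int.natCast_nonneg n
      have h1 : cost ≤ ((n : Int) + 1) * cost := by nlinarith
      rw [if_pos (by push_cast; linarith)]
      rw [hdz]
      refine Prod.ext ?_ ?_ <;> simp only <;> ring

theorem stageA1 (r : Int) (hr : 0 ≤ r) :
    loopA 19 1 r = if r < 4000 then (1 + r / 800, r - r / 800 * 800) else loopA 14 6 (r - 4000) := by
  have := tierA 800 (by norm_num) 5 19 1 r (by norm_num) hr (by norm_num)
    (by intro j h0 h5; unfold xp_per_level; rw [if_pos (by push_cast at h5; omega)])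
  simpa using this

theorem stageA2 (r : Int) (hr : 0 ≤ r) :
    loopA 14 6 r = if r < 7500 then (6 + r / 1500, r - r / 1500 * 1500) else loopA 9 11 (r - 7500) := by
  have := tierA 1500 (by norm_num) 5 14 6 r (by norm_num) hr (by norm_num)
    (by intro j h0 h5; unfold xp_per_level; push_cast at h5
        rw [if_neg (by omega), if_pos (by omega)])
  simpa using this

theorem stageA3 (r : Int) (hr : 0 ≤ r) :
    loopA 9 11 r = if r < 12500 then (11 + r / 2500, r - r / 2500 * 2500) else loopA 4 16 (r - 12500) := by
  have := tierA 2500 (by norm_num) 5 9 11 r (by norm_num) hr (by norm_num)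
    (by intro j h0 h5; unfold xp_per_level; push_cast at h5
        rw [if_neg (by omega), if_neg (by omega), if_pos (by omega)])
  simpa using this

theorem stageA4 (r : Int) (hr : 0 ≤ r) :
    loopA 4 16 r = if r < 16000 then (16 + r / 4000, r - r / 4000 * 4000) else (20, r - 16000) := by
  have := tierA 4000 (by norm_num) 4 4 16 r (by norm_num) hr (by norm_num)
    (by intro j h0 h4; unfold xp_per_level; push_cast at h4
        rw [if_neg (by omega), if_neg (by omega), if_neg (by omega), if_pos (by omega)])
  simpa [loopA] using this

theorem loops_agree (r : Int) (hr : 0 ≤ r) : loopA 19 1 r = loopB pvTiers 1 r := by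
  simp only [loopB, pvTiers,
    show ∀ a : Int, PySem.Int.floordiv a 800 = a / 800 from
      fun a => PySem.Int.floordiv_eq_ediv_of_pos (by norm_num),
    show ∀ a : Int, PySem.Int.floordiv a 1500 = a / 1500 from
      fun a => PySem.Int.floordiv_eq_ediv_of_pos (by norm_num),
    show ∀ a : Int, PySem.Int.floordiv a 2500 = a / 2500 from
      fun a => PySem.Int.floordiv_eq_ediv_of_pos (by norm_num),
    show ∀ a : Int, PySem.Int.floordiv a 4000 = a / 4000 from
      fun a => PySem.Int.floordiv_eq_ediv_of_pos (by norm_num)]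
  rw [stageA1 r hr]
  by_cases h1 : r < 4000
  · rw [if_pos h1]
    split_ifs <;> refine Prod.ext ?_ ?_ <;> simp only <;> omega
  · rw [if_neg h1, stageA2 _ (by omega)]
    by_cases h2 : r - 4000 < 7500
    · rw [if_pos h2]
      split_ifs <;> refine Prod.ext ?_ ?_ <;> simp only <;> omega
    · rw [if_neg h2, stageA3 _ (by omega)]
      by_cases h3 : r - 4000 - 7500 < 12500
      · rw [if_pos h3]
        split_ifs <;> refine Prod.ext ?_ ?_ <;> simp only <;> omega
      · rw [if_neg h3, stageA4 _ (by omega)]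
        by_cases h4 : r - 4000 - 7500 - 12500 < 16000
        · rw [if_pos h4]
          split_ifs <;> refine Prod.ext ?_ ?_ <;> simp only <;> omega
        · rw [if_neg h4]
          split_ifs <;> refine Prod.ext ?_ ?_ <;> simp only <;> omega

-- ===== VERDICT (by name: the statement is the Claim_ definition above) =====
theorem compute_level_from_total_xp_spec : Claim_equal_compute_level_from_total_xp := by
  intro total_xp _
  unfold Spec_compute_level_from_total_xp compute_level_from_total_xp compute_level_from_total_xp_alt
  rw [loops_agree (max 0 total_xp) (le_max_left 0 total_xp)]
  rcases h : loopB pvTiers 1 (max 0 total_xp) with ⟨l, rem⟩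
  simp only
  congr 1
  by_cases hl : l < 20 <;> simp [hl]
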